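-- pv_equiv track=rewrite | github.com/2401867/- | Лабораторная работа/№3/2(14).py | swap_max_and_first_negative
-- ===== SOURCE A (Python) =====
-- def swap_max_and_first_negative(arr):
--     if not arr:  # Проверка на пустой массив
--         return arr
--
--     # Находим максимальный элемент
--     max_index = arr.index(max(arr))
--
--     # Находим первый отрицательный элемент
--     first_negative_index = next((i for i, x in enumerate(arr) if x < 0), None)
--
--     if first_negative_index is not None:
--         # Меняем местами
--         arr[max_index], arr[first_negative_index] = arr[first_negative_index], arr[max_index]
--
--     return arr
-- ===== SOURCE B (Python) =====
-- def swap_max_and_first_negative(arr):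
--     if not arr:
--         return arr
--
--     # Divide and conquer: reduce(lo, hi) returns (max value, index of its first
--     # occurrence, index of first negative or None) for the segment arr[lo:hi],
--     # combining the answers of the two halves (left wins max ties).
--     def reduce(lo, hi):
--         if hi - lo == 1:
--             x = arr[lo]
--             return (x, lo, lo if x < 0 else None)
--         mid = (lo + hi) // 2
--         lv, li, lf = reduce(lo, mid)
--         rv, ri, rf = reduce(mid, hi)
--         mv, mi = (rv, ri) if rv > lv else (lv, li)
--         return (mv, mi, lf if lf is not None else rf)
--
--     _, max_index, first_negative_index = reduce(0, len(arr))
--     if first_negative_index is not None: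
--         arr[max_index], arr[first_negative_index] = arr[first_negative_index], arr[max_index]
--     return arr
-- ===== Notes on version B (the rewrite author's own statement) =====
-- stated objective: alternative
-- what changed: Replaced the three sequential scans (max(), .index(), generator over enumerate) by a divide-and-conquer recursion that splits the range in half and combines (max value, first max index, first negative index) from the two halves, then does the same in-place swap.
import Mathlib
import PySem

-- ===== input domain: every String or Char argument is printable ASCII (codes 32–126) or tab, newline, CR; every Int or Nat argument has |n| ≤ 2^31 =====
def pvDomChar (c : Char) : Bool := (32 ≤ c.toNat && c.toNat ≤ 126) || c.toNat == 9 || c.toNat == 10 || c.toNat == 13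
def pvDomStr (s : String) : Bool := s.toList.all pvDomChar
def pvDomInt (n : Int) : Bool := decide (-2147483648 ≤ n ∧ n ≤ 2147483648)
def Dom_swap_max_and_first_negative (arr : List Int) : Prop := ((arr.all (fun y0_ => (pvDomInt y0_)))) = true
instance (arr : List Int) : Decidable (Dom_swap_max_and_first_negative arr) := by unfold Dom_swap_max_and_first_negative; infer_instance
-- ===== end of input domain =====

-- B replaces A's three sequential scans (max(), .index(), generator over enumerate) by a
-- divide-and-conquer recursion combining (max, first-max index, first-negative index) of the
-- two halves; same in-place swap in Python, equivalence proved about the return value.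


-- ===== PORT A =====
def swap_max_and_first_negative (arr : List Int) : List Int :=
  if arr.isEmpty then arr
  else
    match PySem.List.max? arr (fun y => y) with          -- max(arr); some since arr ≠ []
    | none => arr
    | some m =>
      match PySem.List.index? arr m with                 -- arr.index(max(arr)); some since m ∈ arr
      | none => arr
      | some maxIdx =>
        -- next((i for i, x in enumerate(arr) if x < 0), None)
        match (PySem.List.enumerate arr).find? (fun p => decide (p.2 < 0)) with
        | none => arr
        | some p =>
          -- indices from enumerate(arr) start at 0, so p.1 ≥ 0 and .toNat is exact
          let fn := p.1.toNat
          -- arr[max_index], arr[first_negative_index] = arr[first_negative_index], arr[max_index]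
          (arr.set maxIdx (arr.getD fn 0)).set fn (arr.getD maxIdx 0)

-- ===== PORT B =====
-- Source B's reduce(lo, hi): divide-and-conquer over the index range.  The Python helper is only
-- ever called with lo < hi; the base-case guard 'hi ≤ lo + 1' (vs Python's 'hi - lo == 1')
-- coincides with it on every reachable call and makes the recursion total.
def pvReduce (arr : List Int) (lo hi : Nat) : Int × Nat × Option Nat :=
  if hi ≤ lo + 1 then
    let x := arr.getD lo 0
    (x, lo, if x < 0 then some lo else none)
  else
    let mid := (lo + hi) / 2
    let l := pvReduce arr lo mid
    let r := pvReduce arr mid hi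
    let mvmi := if r.1 > l.1 then (r.1, r.2.1) else (l.1, l.2.1)
    (mvmi.1, mvmi.2, match l.2.2 with | some j => some j | none => r.2.2)
termination_by hi - lo
decreasing_by all_goals omega

def swap_max_and_first_negative_alt (arr : List Int) : List Int :=
  match arr with
  | [] => arr
  | _ :: _ =>
    match pvReduce arr 0 arr.length with
    | (_, maxIdx, fni) =>
      match fni with
      | none => arr
      | some fn => (arr.set maxIdx (arr.getD fn 0)).set fn (arr.getD maxIdx 0)

-- ===== PRECONDITION & SPEC =====
def Spec_swap_max_and_first_negative (arr : List Int) (out : List Int) : Prop := out = swap_max_and_first_negative_alt arr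
instance (arr : List Int) (out : List Int) : Decidable (Spec_swap_max_and_first_negative arr out) := by unfold Spec_swap_max_and_first_negative; infer_instance

-- ===== CLAIM (what is proved, stated in full; the proofs are below) =====
def Claim_equal_swap_max_and_first_negative : Prop := ∀ (arr : List Int), Dom_swap_max_and_first_negative arr → Spec_swap_max_and_first_negative arr (swap_max_and_first_negative arr)

-- ===== LEMMAS AND PROOFS =====

-- maximum of a nonempty list, as A's running max computes it
def pvSegMax : List Int → Int
  | [] => 0
  | x :: t => t.foldl max x

theorem pvFoldlMaxShift (l : List Int) : ∀ (a b : Int), l.foldl max (max a b) = max a (l.foldl max b) := by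
  induction l with
  | nil => intro a b; rfl
  | cons c l ih =>
    intro a b
    simp only [List.foldl_cons, max_assoc, ih]

theorem pvSegMax_append (s t : List Int) (hs : s ≠ []) (ht : t ≠ []) :
    pvSegMax (s ++ t) = max (pvSegMax s) (pvSegMax t) := by
  cases s with
  | nil => exact absurd rfl hs
  | cons x s' =>
    cases t with
    | nil => exact absurd rfl ht
    | cons y t' =>
      simp only [pvSegMax, List.cons_append, List.foldl_append, List.foldl_cons]
      exact pvFoldlMaxShift t' _ y

theorem pvSegMax_mem (l : List Int) (h : l ≠ []) : pvSegMax l ∈ l := by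
  cases l with
  | nil => exact absurd rfl h
  | cons x t =>
    rcases PySem.List.foldl_max_mem t x with h' | h'
    · simp [pvSegMax, h']
    · simp [pvSegMax, List.mem_cons, h']

theorem pvMem_le_segMax (l : List Int) (a : Int) (h : a ∈ l) : a ≤ pvSegMax l := by
  cases l with
  | nil => cases h
  | cons x t =>
    rcases List.mem_cons.mp h with rfl | h'
    · exact (PySem.List.le_foldl_max t a).1
    · exact (PySem.List.le_foldl_max t x).2 a h'

-- invariant of Source B's reduce: on a valid range it computes the max of the segment,
-- the offset index of its first occurrence and the offset index of the first negative
theorem pvReduce_spec (n : Nat) : ∀ (arr : List Int) (lo hi : Nat), hi - lo ≤ n → lo < hi → hi ≤ arr.length →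
    pvReduce arr lo hi =
      (pvSegMax ((arr.drop lo).take (hi - lo)),
       lo + ((arr.drop lo).take (hi - lo)).idxOf (pvSegMax ((arr.drop lo).take (hi - lo))),
       (((arr.drop lo).take (hi - lo)).findIdx? (fun y => decide (y < 0))).map (· + lo)) := by
  induction n with
  | zero => intro arr lo hi h1 h2 _; omega
  | succ n ih =>
    intro arr lo hi h1 h2 h3
    by_cases hb : hi ≤ lo + 1
    · -- base case: segment is the singleton [arr[lo]]
      have hhi : hi = lo + 1 := by omega
      subst hhi
      have hlo : lo < arr.length := by omega
      have hdrop : arr.drop lo = arr[lo] :: arr.drop (lo + 1) := List.drop_eq_getElem_cons hlo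
      have hgd : arr.getD lo 0 = arr[lo] := by
        simp [List.getD, List.getElem?_eq_getElem hlo]
      have hseg : (arr.drop lo).take (lo + 1 - lo) = [arr[lo]] := by
        rw [show lo + 1 - lo = 1 by omega, hdrop, List.take_succ_cons, List.take_zero]
      rw [pvReduce, if_pos hb, hseg, hgd]
      refine Prod.ext rfl (Prod.ext ?_ ?_)
      · simp [pvSegMax, List.idxOf_cons_self]
      · by_cases hx : arr[lo] < 0 <;> simp [List.findIdx?_cons, hx]
    · -- inductive case: split at mid and combine the halves
      have hm1 : lo < (lo + hi) / 2 := by omega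
      have hm2 : (lo + hi) / 2 < hi := by omega
      have ihl := ih arr lo ((lo + hi) / 2) (by omega) hm1 (by omega)
      have ihr := ih arr ((lo + hi) / 2) hi (by omega) hm2 h3
      rw [pvReduce, if_neg hb]
      simp only [ihl, ihr]
      set mid := (lo + hi) / 2 with hmid
      set s1 := (arr.drop lo).take (mid - lo) with hs1
      set s2 := (arr.drop mid).take (hi - mid) with hs2
      have hsplit : (arr.drop lo).take (hi - lo) = s1 ++ s2 := by
        rw [hs1, hs2, show hi - lo = (mid - lo) + (hi - mid) by omega, List.take_add,
            List.drop_drop, show lo + (mid - lo) = mid by omega]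
      have hl1 : s1.length = mid - lo := by
        rw [hs1]; simp [List.length_take, List.length_drop]; omega
      have hl2 : s2.length = hi - mid := by
        rw [hs2]; simp [List.length_take, List.length_drop]; omega
      have hs1ne : s1 ≠ [] := by
        intro h; rw [h] at hl1; simp at hl1; omega
      have hs2ne : s2 ≠ [] := by
        intro h; rw [h] at hl2; simp at hl2; omega
      rw [hsplit]
      have hmax := pvSegMax_append s1 s2 hs1ne hs2ne
      by_cases hgt : pvSegMax s2 > pvSegMax s1
      · -- right half wins: its max does not occur in the left half
        have hveq : pvSegMax (s1 ++ s2) = pvSegMax s2 := by rw [hmax]; omega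
        have hnm : pvSegMax s2 ∉ s1 := fun hmem => by
          have := pvMem_le_segMax s1 _ hmem; omega
        simp only [if_pos hgt, hveq]
        refine Prod.ext rfl (Prod.ext ?_ ?_)
        · simp only [List.idxOf_append, if_neg hnm, hl1]
          omega
        · simp only [List.findIdx?_append]
          cases hf : s1.findIdx? (fun y => decide (y < 0)) with
          | some j => simp
          | none =>
            simp only [Option.map_none, Option.or, Option.map_map, hl1]
            cases s2.findIdx? (fun y => decide (y < 0)) with
            | none => simp
            | some k => simp; omega
      · -- left half wins (ties included): first occurrence stays in the left half
        have hveq : pvSegMax (s1 ++ s2) = pvSegMax s1 := by rw [hmax]; omega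
        have hin : pvSegMax s1 ∈ s1 := pvSegMax_mem s1 hs1ne
        simp only [if_neg hgt, hveq]
        refine Prod.ext rfl (Prod.ext ?_ ?_)
        · simp [List.idxOf_append, hin]
        · simp only [List.findIdx?_append]
          cases hf : s1.findIdx? (fun y => decide (y < 0)) with
          | some j => simp
          | none =>
            simp only [Option.map_none, Option.or, Option.map_map, hl1]
            cases s2.findIdx? (fun y => decide (y < 0)) with
            | none => simp
            | some k => simp; omega

-- bridge for A's generator over enumerate
theorem find?_enumerate_neg (t : List Int) (s : Int) :
    (PySem.List.enumerate t s).find? (fun p => decide (p.2 < 0)) =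
      (t.findIdx? (fun y => decide (y < 0))).map (fun (k : Nat) => ((s + (k : Int) : Int), t.getD k 0)) := by
  induction t generalizing s with
  | nil => simp [PySem.List.enumerate_nil]
  | cons x t ih =>
    simp only [PySem.List.enumerate_cons, List.find?_cons, List.findIdx?_cons]
    by_cases hx : x < 0
    · simp [hx, List.getD]
    · simp [hx, ih, Option.map_map]
      congr 1
      funext k
      simp [Prod.ext_iff]
      omega

theorem index?_of_mem (l : List Int) (v : Int) (h : v ∈ l) :
    PySem.List.index? l v = some (l.idxOf v) := by
  induction l with
  | nil => cases h
  | cons a l ih =>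
    by_cases hv : a = v
    · subst hv
      rw [PySem.List.index?_cons_self a l, List.idxOf_cons_self]
    · have hm : v ∈ l := by
        rcases List.mem_cons.mp h with h' | h'
        · exact absurd h'.symm hv
        · exact h'
      rw [PySem.List.index?_cons_of_ne l hv, ih hm,
          List.idxOf_cons_ne _ hv]
      rfl

-- ===== VERDICT =====
theorem swap_max_and_first_negative_spec : Claim_equal_swap_max_and_first_negative := by
  intro arr _
  unfold Spec_swap_max_and_first_negative swap_max_and_first_negative swap_max_and_first_negative_alt
  cases arr with
  | nil => rfl
  | cons x t =>
    have hA : PySem.List.max? (x :: t) (fun y => y) = some (t.foldl max x) :=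
      PySem.List.max?_id_cons x t
    have hmem : t.foldl max x ∈ x :: t := PySem.List.max?_mem hA
    have hidx : PySem.List.index? (x :: t) (t.foldl max x) =
        some ((x :: t).idxOf (t.foldl max x)) := index?_of_mem _ _ hmem
    have hred := pvReduce_spec (x :: t).length (x :: t) 0 (x :: t).length
      (by omega) (by simp) (by omega)
    simp only [List.drop_zero, Nat.sub_zero, List.take_length, Nat.zero_add] at hred
    have hsm : pvSegMax (x :: t) = t.foldl max x := rfl
    rw [hsm] at hred
    simp only [List.isEmpty_cons, Bool.false_eq_true, if_false, hA, hidx,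
               find?_enumerate_neg, hred]
    cases hfi : (x :: t).findIdx? (fun y => decide (y < 0)) with
    | none => rfl
    | some k =>
      simp only [Option.map_some]
      have h0 : ((0 : Int) + (k : Int)).toNat = k := by omega
      simp only [h0, Nat.add_zero]
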